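-- pv_equiv track=rewrite | github.com/William-kelvem94/Automatizador | src/domain/services/intelligence_services.py | _analyze_step_order
-- ===== SOURCE A (Python) =====
-- from typing import Dict, Any, List, Optional
--
-- def _analyze_step_order(steps: List[Dict[str, Any]]) -> List[str]:
--     """Analisa ordem dos passos"""
--     issues = []
--
--     # Verifica se há interação com campo antes de preenchê-lo
--     for i, step in enumerate(steps):
--         if step.get('action_type') == 'type':
--             # Verifica se há um passo de foco/clique antes
--             has_prep_step = any(
--                 prev_step.get('action_type') in ['click', 'hover'] and
--                 prev_step.get('selector') == step.get('selector')
--                 for prev_step in steps[:i]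
--             )
--             if not has_prep_step:
--                 issues.append(f"Passo {i+1}: Considerar adicionar foco antes de digitar")
--
--     return issues
-- ===== SOURCE B (Python) =====
-- from typing import Dict, Any, List, Optional
--
-- def _analyze_step_order(steps: List[Dict[str, Any]]) -> List[str]:
--     """Analisa ordem dos passos"""
--     # Pass 1: earliest index at which each selector receives a click/hover.
--     earliest = {}
--     for i, step in enumerate(steps):
--         if step.get('action_type') in ['click', 'hover']:
--             sel = step.get('selector')
--             if sel not in earliest:
--                 earliest[sel] = i
--     # Pass 2: a 'type' step is flagged unless its selector was prepared strictly before it.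
--     issues = []
--     for i, step in enumerate(steps):
--         if step.get('action_type') == 'type':
--             j = earliest.get(step.get('selector'))
--             if j is None or j >= i:
--                 issues.append(f"Passo {i+1}: Considerar adicionar foco antes de digitar")
--     return issues
-- ===== Notes on version B (the rewrite author's own statement) =====
-- stated objective: alternative
-- what changed: Replaced the per-'type'-step rescan of steps[:i] with two flat passes: a first pass builds a dict of the earliest click/hover index per selector, and a second pass flags each 'type' step by comparing that earliest index against its own index.
import Mathlib
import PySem

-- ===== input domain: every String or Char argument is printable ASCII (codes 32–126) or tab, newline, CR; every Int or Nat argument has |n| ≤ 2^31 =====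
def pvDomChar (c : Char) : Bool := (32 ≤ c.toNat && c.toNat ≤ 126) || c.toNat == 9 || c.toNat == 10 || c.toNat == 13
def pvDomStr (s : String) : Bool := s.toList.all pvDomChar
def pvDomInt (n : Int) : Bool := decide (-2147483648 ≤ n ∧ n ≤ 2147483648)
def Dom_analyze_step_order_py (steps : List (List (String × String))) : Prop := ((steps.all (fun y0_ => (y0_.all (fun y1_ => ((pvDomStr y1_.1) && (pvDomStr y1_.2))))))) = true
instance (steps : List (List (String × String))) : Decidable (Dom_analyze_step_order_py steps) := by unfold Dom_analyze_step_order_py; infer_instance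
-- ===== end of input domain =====

-- B restructures A's single loop with an inner rescan of steps[:i] into two flat passes
-- (a dict of earliest click/hover index per selector, then a flat flagging pass): objective alternative.


-- ===== PORT A =====
-- shared accessors: step.get(k) on the step dict, and the issue f-string
def pvGet (st : List (String × String)) (k : String) : Option String :=
  (PySem.Dict.mk st).get? k

def pvPrep (st : List (String × String)) : Bool :=
  pvGet st "action_type" == some "click" || pvGet st "action_type" == some "hover"

def pvMsg (i : Nat) : String :=
  "Passo " ++ PySem.Int.toStr ((i : Int) + 1) ++ ": Considerar adicionar foco antes de digitar"

-- A's single loop: for each 'type' step, rescan steps[:i] for a matching click/hover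
def aLoop (steps : List (List (String × String))) :
    List (List (String × String)) → Nat → List String → List String
  | [], _, issues => issues
  | st :: rest, i, issues =>
    aLoop steps rest (i + 1)
      (if pvGet st "action_type" == some "type" then
        (if (steps.take i).any (fun prev =>
              pvPrep prev && (pvGet prev "selector" == pvGet st "selector"))
         then issues else issues ++ [pvMsg i])
       else issues)

def analyze_step_order_py (steps : List (List (String × String))) : List String :=
  aLoop steps steps 0 []

-- ===== PORT B =====
-- B pass 1: dict mapping each selector to the earliest index of a click/hover step on it
def bFirst : List (List (String × String)) → Nat →
    PySem.Dict (Option String) Nat → PySem.Dict (Option String) Nat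
  | [], _, d => d
  | st :: rest, i, d =>
    bFirst rest (i + 1)
      (if pvPrep st then
        (if d.contains (pvGet st "selector") then d else d.insert (pvGet st "selector") i)
       else d)

-- B pass 2: flag a 'type' step unless its selector's earliest prep index is < i
def bSecond (e : PySem.Dict (Option String) Nat) :
    List (List (String × String)) → Nat → List String → List String
  | [], _, issues => issues
  | st :: rest, i, issues =>
    bSecond e rest (i + 1)
      (if pvGet st "action_type" == some "type" then
        (match e.get? (pvGet st "selector") with
         | none => issues ++ [pvMsg i]
         | some j => if i ≤ j then issues ++ [pvMsg i] else issues)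
       else issues)

def analyze_step_order_py_alt (steps : List (List (String × String))) : List String :=
  bSecond (bFirst steps 0 PySem.Dict.empty) steps 0 []

-- ===== PRECONDITION & SPEC =====
def Spec_analyze_step_order_py (steps : List (List (String × String))) (out : List String) : Prop := out = analyze_step_order_py_alt steps
instance (steps : List (List (String × String))) (out : List String) : Decidable (Spec_analyze_step_order_py steps out) := by unfold Spec_analyze_step_order_py; infer_instance

-- ===== CLAIM (what is proved, stated in full; the proofs are below) =====
def Claim_equal_analyze_step_order_py : Prop := ∀ (steps : List (List (String × String))), Dom_analyze_step_order_py steps → Spec_analyze_step_order_py steps (analyze_step_order_py steps)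

-- ===== LEMMAS AND PROOFS =====

-- first index ≥ i in l of a click/hover step whose selector is s
def findPrep (s : Option String) : List (List (String × String)) → Nat → Option Nat
  | [], _ => none
  | st :: rest, i =>
    if pvPrep st && (pvGet st "selector" == s) then some i else findPrep s rest (i + 1)

theorem findPrep_ge (s : Option String) :
    ∀ (l : List (List (String × String))) (i j : Nat), findPrep s l i = some j → i ≤ j := by
  intro l
  induction l with
  | nil => intro i j h; simp [findPrep] at h
  | cons st rest ih =>
    intro i j h
    simp only [findPrep] at h
    split at h
    · simp_all
    · have := ih (i + 1) j h; omega

theorem bFirst_get (s : Option String) :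
    ∀ (l : List (List (String × String))) (i : Nat) (d : PySem.Dict (Option String) Nat),
      (bFirst l i d).get? s = (d.get? s).or (findPrep s l i) := by
  intro l
  induction l with
  | nil => intro i d; simp [bFirst, findPrep]
  | cons st rest ih =>
    intro i d
    simp only [bFirst, findPrep]
    by_cases hp : pvPrep st = true
    · simp only [hp, if_true, Bool.true_and]
      by_cases hs : pvGet st "selector" = s
      · subst hs
        simp only [beq_self_eq_true, if_true]
        by_cases hc : d.contains (pvGet st "selector") = true
        · rw [if_pos hc, ih]
          rw [PySem.Dict.contains_eq_isSome_get?] at hc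
          obtain ⟨v, hv⟩ := Option.isSome_iff_exists.mp hc
          simp [hv]
        · rw [if_neg hc, ih, PySem.Dict.get?_insert_self]
          rw [PySem.Dict.contains_eq_isSome_get?] at hc
          have : d.get? (pvGet st "selector") = none := by
            cases h : d.get? (pvGet st "selector") <;> simp [h] at hc ⊢
          simp [this]
      · have hbs : (pvGet st "selector" == s) = false := by
          simp [beq_eq_false_iff_ne, hs]
        simp only [hbs, Bool.false_eq_true, if_false]
        by_cases hc : d.contains (pvGet st "selector") = true
        · rw [if_pos hc, ih]
        · rw [if_neg hc, ih, PySem.Dict.get?_insert_of_ne _ _ (fun h => hs h.symm)]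
    · have hp' : pvPrep st = false := by simpa using hp
      simp [hp', ih]

theorem any_take_eq (s : Option String) :
    ∀ (l : List (List (String × String))) (n i : Nat),
      ((l.take i).any (fun prev => pvPrep prev && (pvGet prev "selector" == s)))
        = (match findPrep s l n with
           | some j => decide (j < n + i)
           | none => false) := by
  intro l
  induction l with
  | nil => intro n i; simp [findPrep]
  | cons st rest ih =>
    intro n i
    cases i with
    | zero =>
      simp only [List.take_zero, List.any_nil, findPrep]
      by_cases h : (pvPrep st && (pvGet st "selector" == s)) = true
      · simp [h]
      · have h' : (pvPrep st && (pvGet st "selector" == s)) = false := by simpa using h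
        simp only [h', Bool.false_eq_true, if_false]
        cases hf : findPrep s rest (n + 1) with
        | none => rfl
        | some j =>
          have := findPrep_ge s rest (n + 1) j hf
          simp; omega
    | succ i' =>
      simp only [List.take_succ_cons, List.any_cons, findPrep]
      by_cases h : (pvPrep st && (pvGet st "selector" == s)) = true
      · simp only [h, if_true, Bool.true_or]
        simp
      · have h' : (pvPrep st && (pvGet st "selector" == s)) = false := by simpa using h
        simp only [h', Bool.false_eq_true, if_false, Bool.false_or]
        rw [ih (n + 1) i']
        cases hf : findPrep s rest (n + 1) with
        | none => rfl
        | some j => simp only []; rw [decide_eq_decide]; omega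

theorem loops_eq (steps : List (List (String × String))) :
    ∀ (rest : List (List (String × String))) (i : Nat) (issues : List String),
      aLoop steps rest i issues = bSecond (bFirst steps 0 PySem.Dict.empty) rest i issues := by
  intro rest
  induction rest with
  | nil => intro i issues; rfl
  | cons st t ih =>
    intro i issues
    simp only [aLoop, bSecond]
    rw [ih]
    congr 1
    by_cases ht : (pvGet st "action_type" == some "type") = true
    · rw [if_pos ht, if_pos ht]
      have hE : (bFirst steps 0 PySem.Dict.empty).get? (pvGet st "selector")
          = findPrep (pvGet st "selector") steps 0 := by
        rw [bFirst_get]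
        simp [PySem.Dict.get?_empty]
      rw [hE, any_take_eq (pvGet st "selector") steps 0 i]
      cases hf : findPrep (pvGet st "selector") steps 0 with
      | none => simp
      | some j =>
        simp only [Nat.zero_add]
        by_cases hji : j < i
        · rw [if_pos (by simpa using hji), if_neg (by omega)]
        · rw [if_neg (by simpa using hji), if_pos (by omega)]
    · rw [if_neg ht, if_neg ht]

-- ===== VERDICT (by name: the statement is the Claim_ definition above) =====
theorem analyze_step_order_py_spec : Claim_equal_analyze_step_order_py := by
  intro steps _
  unfold Spec_analyze_step_order_py analyze_step_order_py analyze_step_order_py_alt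
  exact loops_eq steps steps 0 []
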